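-- pv_equiv track=rewrite | github.com/g-soulie/UF-yuml | uf_yuml.py | retirer_methods
-- ===== SOURCE A (Python) =====
-- def retirer_methods(string_yuml):#Retire les methods d'une string yuml
--     pos = 0
--     new_string=""
--     for i in range(len(string_yuml)):
--         if string_yuml[i] == '|':
--             pos += 1
--             if pos == 1:
--                 new_string += '|'
--         else:
--             if string_yuml[i] == ']':
--                 pos = 0
--                 new_string += ']'
--             else:
--                 if pos < 2:
--                     new_string += string_yuml[i]
--     string_yuml=new_string
--     return string_yuml
-- ===== SOURCE B (Python) =====
-- def retirer_methods(string_yuml):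
--     # Split-based rewrite: drop everything after the second '|' of each ']'-delimited segment.
--     return ']'.join('|'.join(seg.split('|')[:2]) for seg in string_yuml.split(']'))
-- ===== Notes on version B (the rewrite author's own statement) =====
-- stated objective: simpler
-- what changed: Replaced the per-character pos-counter state machine with two levels of split/join: split on ']', keep the first two '|'-separated parts of each segment, rejoin.
import Mathlib
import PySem

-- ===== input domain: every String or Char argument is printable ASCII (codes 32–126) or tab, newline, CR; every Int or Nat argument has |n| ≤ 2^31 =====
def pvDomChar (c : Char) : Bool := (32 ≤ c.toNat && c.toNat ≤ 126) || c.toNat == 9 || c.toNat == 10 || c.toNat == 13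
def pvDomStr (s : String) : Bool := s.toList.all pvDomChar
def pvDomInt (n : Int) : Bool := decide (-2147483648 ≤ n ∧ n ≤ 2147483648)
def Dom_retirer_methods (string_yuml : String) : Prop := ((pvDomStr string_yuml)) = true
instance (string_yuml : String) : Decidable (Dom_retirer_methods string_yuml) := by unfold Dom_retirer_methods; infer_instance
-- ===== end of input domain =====

-- B replaces A's per-character pos-counter state machine by split/join (objective: simpler).

-- ===== PORT A =====
-- the for-loop over range(len(string_yuml)) as structural recursion over the characters,
-- carrying the same state (pos, new_string as an accumulator list)
def retirerAuxA : List Char → Nat → List Char → List Char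
  | [], _, acc => acc
  | c :: t, pos, acc =>
    if c = '|' then
      if pos + 1 = 1 then retirerAuxA t (pos + 1) (acc ++ ['|'])
      else retirerAuxA t (pos + 1) acc
    else if c = ']' then retirerAuxA t 0 (acc ++ [']'])
    else if pos < 2 then retirerAuxA t pos (acc ++ [c])
    else retirerAuxA t pos acc

def retirer_methods (string_yuml : String) : String :=
  String.mk (retirerAuxA string_yuml.toList 0 [])

-- ===== PORT B =====
-- str.split(sep) for a one-character sep, returned as (first piece, remaining pieces)
-- (the split list is always nonempty, so this pair is exactly Python's list)
def pvSplit (x : Char) : List Char → List Char × List (List Char)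
  | [] => ([], [])
  | c :: t =>
    let p := pvSplit x t
    if c = x then ([], p.1 :: p.2) else (c :: p.1, p.2)

-- sep.join(parts)
def pvJoin (sep : List Char) : List (List Char) → List Char
  | [] => []
  | [a] => a
  | a :: b :: r => a ++ sep ++ pvJoin sep (b :: r)

-- '|'.join(seg.split('|')[:2])  (the [:2] slice with literal nonneg bounds is List.take 2)
def truncSeg (seg : List Char) : List Char :=
  let q := pvSplit '|' seg
  pvJoin ['|'] ((q.1 :: q.2).take 2)

def retirer_methods_alt (string_yuml : String) : String :=
  let p := pvSplit ']' string_yuml.toList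
  String.mk (pvJoin [']'] ((p.1 :: p.2).map truncSeg))

-- ===== PRECONDITION & SPEC =====
def Spec_retirer_methods (string_yuml : String) (out : String) : Prop := out = retirer_methods_alt string_yuml
instance (string_yuml : String) (out : String) : Decidable (Spec_retirer_methods string_yuml out) := by unfold Spec_retirer_methods; infer_instance

-- ===== CLAIM (what is proved, stated in full; the proofs are below) =====
def Claim_equal_retirer_methods : Prop := ∀ (string_yuml : String), Dom_retirer_methods string_yuml → Spec_retirer_methods string_yuml (retirer_methods string_yuml)

-- ===== LEMMAS AND PROOFS =====

-- what A's state machine emits for the current segment when `pos` pipes were already seen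
def headOut (pos : Nat) (seg : List Char) : List Char :=
  let q := pvSplit '|' seg
  pvJoin ['|'] ((q.1 :: q.2).take (2 - pos))

-- what is emitted for the segments after the first ']'
def restOut (rest : List (List Char)) : List Char :=
  (rest.map (fun seg => ']' :: truncSeg seg)).flatten

theorem auxA_cons (c : Char) (t : List Char) (pos : Nat) (acc : List Char) :
    retirerAuxA (c :: t) pos acc =
      if c = '|' then
        if pos + 1 = 1 then retirerAuxA t (pos + 1) (acc ++ ['|'])
        else retirerAuxA t (pos + 1) acc
      else if c = ']' then retirerAuxA t 0 (acc ++ [']'])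
      else if pos < 2 then retirerAuxA t pos (acc ++ [c])
      else retirerAuxA t pos acc := by
  simp [retirerAuxA]

theorem auxA_append (t : List Char) : ∀ pos (a b : List Char),
    retirerAuxA t pos (a ++ b) = a ++ retirerAuxA t pos b := by
  induction t with
  | nil => intro pos a b; simp [retirerAuxA]
  | cons c t ih =>
    intro pos a b
    rw [auxA_cons, auxA_cons c t pos b]
    split_ifs <;> simp [List.append_assoc, ih]

theorem auxA_acc (t : List Char) (pos : Nat) (acc : List Char) :
    retirerAuxA t pos acc = acc ++ retirerAuxA t pos [] := by
  have h := auxA_append t pos acc []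
  simpa using h

theorem split_cons (x c : Char) (t : List Char) :
    pvSplit x (c :: t) =
      if c = x then ([], (pvSplit x t).1 :: (pvSplit x t).2)
      else (c :: (pvSplit x t).1, (pvSplit x t).2) := by
  simp [pvSplit]

theorem pvJoin_cons_head (sep a : List Char) (c : Char) (l : List (List Char)) :
    pvJoin sep ((c :: a) :: l) = c :: pvJoin sep (a :: l) := by
  cases l <;> simp [pvJoin]

theorem pvJoin_cons₂ (sep a b : List Char) (l : List (List Char)) :
    pvJoin sep (a :: b :: l) = a ++ sep ++ pvJoin sep (b :: l) := rfl

theorem headOut_nil (pos : Nat) : headOut pos [] = [] := by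
  unfold headOut
  simp only [pvSplit]
  cases h : 2 - pos <;> simp [h, pvJoin]

theorem headOut_ge2 (pos : Nat) (h : 2 ≤ pos) (seg : List Char) : headOut pos seg = [] := by
  unfold headOut
  have h0 : 2 - pos = 0 := by omega
  simp [h0, pvJoin]

theorem headOut_pipe0 (s : List Char) : headOut 0 ('|' :: s) = '|' :: headOut 1 s := by
  unfold headOut
  rw [split_cons, if_pos rfl]
  simp [pvJoin, pvJoin_cons₂]

theorem headOut_pipe1 (s : List Char) : headOut 1 ('|' :: s) = [] := by
  unfold headOut
  rw [split_cons, if_pos rfl]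
  simp [pvJoin]

theorem headOut_char (c : Char) (hc : c ≠ '|') (pos : Nat) (hp : pos < 2) (s : List Char) :
    headOut pos (c :: s) = c :: headOut pos s := by
  unfold headOut
  rw [split_cons, if_neg hc]
  obtain ⟨k, hk⟩ : ∃ k, 2 - pos = k + 1 := ⟨1 - pos, by omega⟩
  simp only [hk, List.take_succ_cons, pvJoin_cons_head]

theorem headOut_trunc (seg : List Char) : headOut 0 seg = truncSeg seg := rfl

theorem main_lemma (t : List Char) : ∀ pos,
    retirerAuxA t pos [] = headOut pos (pvSplit ']' t).1 ++ restOut (pvSplit ']' t).2 := by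
  induction t with
  | nil => intro pos; simp [retirerAuxA, pvSplit, headOut_nil, restOut]
  | cons c t ih =>
    intro pos
    rw [auxA_cons]
    by_cases hp : c = '|'
    · subst hp
      rw [if_pos rfl, split_cons, if_neg (show ('|' : Char) ≠ ']' by decide)]
      dsimp only
      rcases pos with _ | _ | pos
      · rw [if_pos (show 0 + 1 = 1 from rfl)]
        simp only [List.nil_append]
        rw [auxA_acc, ih (0 + 1), headOut_pipe0]
        simp
      · rw [if_neg (show ¬(1 + 1 = 1) by omega), ih (1 + 1),
          headOut_ge2 (1 + 1) (by omega), headOut_pipe1]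
      · rw [if_neg (show ¬(pos + 2 + 1 = 1) by omega), ih (pos + 2 + 1),
          headOut_ge2 (pos + 2 + 1) (by omega), headOut_ge2 (pos + 2) (by omega)]
    · rw [if_neg hp]
      by_cases hb : c = ']'
      · subst hb
        rw [if_pos rfl, split_cons, if_pos rfl]
        dsimp only
        simp only [List.nil_append]
        rw [auxA_acc, ih 0, headOut_nil, headOut_trunc]
        simp [restOut]
      · rw [if_neg hb, split_cons, if_neg hb]
        dsimp only
        rcases Nat.lt_or_ge pos 2 with hlt | hge
        · rw [if_pos hlt]
          simp only [List.nil_append]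
          rw [auxA_acc, ih pos, headOut_char c hp pos hlt]
          simp
        · rw [if_neg (show ¬pos < 2 by omega), ih pos,
            headOut_ge2 pos hge, headOut_ge2 pos hge]

theorem join_bracket : ∀ (rest : List (List Char)) (s : List Char),
    pvJoin [']'] ((s :: rest).map truncSeg) = truncSeg s ++ restOut rest
  | [], s => by simp [pvJoin, restOut]
  | b :: r, s => by
    have ih := join_bracket r b
    simp only [List.map_cons] at ih ⊢
    rw [pvJoin_cons₂, ih]
    simp [restOut]

-- ===== VERDICT (by name: the statement is the Claim_ definition above) =====
theorem retirer_methods_spec : Claim_equal_retirer_methods := by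
  intro s _
  unfold Spec_retirer_methods retirer_methods retirer_methods_alt
  show String.mk (retirerAuxA s.toList 0 []) =
    String.mk (pvJoin [']'] (((pvSplit ']' s.toList).1 :: (pvSplit ']' s.toList).2).map truncSeg))
  rw [main_lemma s.toList 0, join_bracket, headOut_trunc]
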